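-- pv_equiv track=rewrite | github.com/PKU-Alignment/align-anything | align_anything/serve/omni_modal_cli.py | satisfy_modal
-- ===== SOURCE A (Python) =====
-- AUDIO_FILES = ['.wav', '.mp3', '.flac', '.m4a', '.ogg', '.aac']
--
-- IMAGE_FILES = ['.jpg', '.jpeg', '.png', '.bmp', '.gif', '.tiff', '.ico', '.webp']
--
-- VIDEO_FILES = ['.mp4', '.avi', '.mov', '.mkv', '.wmv', '.flv', '.webm']
--
-- def satisfy_modal(info: str):
--     for file in AUDIO_FILES:
--         if info.endswith(file):
--             return 'audio'
--     for file in IMAGE_FILES: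
--         if info.endswith(file):
--             return 'image'
--     for file in VIDEO_FILES:
--         if info.endswith(file):
--             return 'video'
-- ===== SOURCE B (Python) =====
-- _EXT_TO_MODAL = {
--     '.wav': 'audio', '.mp3': 'audio', '.flac': 'audio', '.m4a': 'audio',
--     '.ogg': 'audio', '.aac': 'audio',
--     '.jpg': 'image', '.jpeg': 'image', '.png': 'image', '.bmp': 'image',
--     '.gif': 'image', '.tiff': 'image', '.ico': 'image', '.webp': 'image',
--     '.mp4': 'video', '.avi': 'video', '.mov': 'video', '.mkv': 'video',
--     '.wmv': 'video', '.flv': 'video', '.webm': 'video',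
-- }
--
-- def satisfy_modal(info: str):
--     i = info.rfind('.')
--     if i == -1:
--         return None
--     return _EXT_TO_MODAL.get(info[i:])
-- ===== Notes on version B (the rewrite author's own statement) =====
-- stated objective: simpler
-- what changed: Replaced A's three sequential endswith loops over extension lists by a single dict mapping extension to modality, keyed on the last-dot suffix info[info.rfind('.'):].
import Mathlib
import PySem

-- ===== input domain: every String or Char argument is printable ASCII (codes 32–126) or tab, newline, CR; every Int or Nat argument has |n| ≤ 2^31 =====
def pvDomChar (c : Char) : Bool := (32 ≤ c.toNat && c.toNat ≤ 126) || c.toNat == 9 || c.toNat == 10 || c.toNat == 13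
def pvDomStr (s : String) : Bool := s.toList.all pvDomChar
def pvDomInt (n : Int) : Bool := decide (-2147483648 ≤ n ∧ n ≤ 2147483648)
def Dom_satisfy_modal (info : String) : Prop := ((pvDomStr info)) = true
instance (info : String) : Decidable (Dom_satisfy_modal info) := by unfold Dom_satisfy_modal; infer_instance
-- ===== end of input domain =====

-- B replaces A's three sequential endswith loops by one dict lookup keyed on the
-- last-dot suffix of the file name (objective: simpler/idiomatic; same observable value).

-- ===== PORT A =====
def AUDIO_FILES : List String := [".wav", ".mp3", ".flac", ".m4a", ".ogg", ".aac"]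
def IMAGE_FILES : List String := [".jpg", ".jpeg", ".png", ".bmp", ".gif", ".tiff", ".ico", ".webp"]
def VIDEO_FILES : List String := [".mp4", ".avi", ".mov", ".mkv", ".wmv", ".flv", ".webm"]

-- A: three for-loops with early return ('for file in L: if info.endswith(file): return m').
def satisfy_modal (info : String) : Option String :=
  if AUDIO_FILES.any (fun file => PySem.Str.endswith info file) then some "audio"
  else if IMAGE_FILES.any (fun file => PySem.Str.endswith info file) then some "image"
  else if VIDEO_FILES.any (fun file => PySem.Str.endswith info file) then some "video"
  else none

-- ===== PORT B =====
def EXT_TO_MODAL : PySem.Dict String String := PySem.Dict.ofList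
  [(".wav", "audio"), (".mp3", "audio"), (".flac", "audio"), (".m4a", "audio"),
   (".ogg", "audio"), (".aac", "audio"),
   (".jpg", "image"), (".jpeg", "image"), (".png", "image"), (".bmp", "image"),
   (".gif", "image"), (".tiff", "image"), (".ico", "image"), (".webp", "image"),
   (".mp4", "video"), (".avi", "video"), (".mov", "video"), (".mkv", "video"),
   (".wmv", "video"), (".flv", "video"), (".webm", "video")]

-- B: i = info.rfind('.'); None if i == -1 else _EXT_TO_MODAL.get(info[i:])
def satisfy_modal_alt (info : String) : Option String :=
  let i := PySem.Str.rfind info "."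
  if i = -1 then none
  else EXT_TO_MODAL.get? (PySem.Str.slice info (some i) none)

-- ===== PRECONDITION & SPEC =====
def Spec_satisfy_modal (info : String) (out : Option String) : Prop := out = satisfy_modal_alt info
instance (info : String) (out : Option String) : Decidable (Spec_satisfy_modal info out) := by unfold Spec_satisfy_modal; infer_instance

-- ===== CLAIM (what is proved, stated in full; the proofs are below) =====
def Claim_equal_satisfy_modal : Prop := ∀ (info : String), Dom_satisfy_modal info → Spec_satisfy_modal info (satisfy_modal info)

-- ===== LEMMAS AND PROOFS =====

-- rfind.go scans indices k, k-1, …, 0 and returns the largest index where the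
-- pattern is a prefix of the corresponding drop, or -1.
lemma rfind_go_spec (l : List Char) (k : Nat) :
    (PySem.Chars.rfind.go l ['.'] k = -1 ∧ ∀ j : Nat, j ≤ k → ¬ ['.'] <+: l.drop j) ∨
    (∃ j : Nat, j ≤ k ∧ PySem.Chars.rfind.go l ['.'] k = (j : Int) ∧ ['.'] <+: l.drop j ∧
      ∀ j' : Nat, j < j' → j' ≤ k → ¬ ['.'] <+: l.drop j') := by
  induction k with
  | zero =>
    by_cases h : ['.'] <+: l
    · right
      exact ⟨0, le_refl 0, by simp [PySem.Chars.rfind.go, List.isPrefixOf_iff_prefix, h],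
        by simpa using h, by omega⟩
    · left
      constructor
      · simp [PySem.Chars.rfind.go, List.isPrefixOf_iff_prefix, h]
      · intro j hj; interval_cases j; simpa using h
  | succ k ih =>
    by_cases h : ['.'] <+: l.drop (k + 1)
    · right
      refine ⟨k + 1, le_refl _, ?_, h, by omega⟩
      simp [PySem.Chars.rfind.go, List.isPrefixOf_iff_prefix, h]
    · have hgo : PySem.Chars.rfind.go l ['.'] (k + 1) = PySem.Chars.rfind.go l ['.'] k := by
        simp [PySem.Chars.rfind.go, List.isPrefixOf_iff_prefix, h]
      rcases ih with ⟨h1, h2⟩ | ⟨j, hjk, hval, hpre, hmax⟩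
      · left
        refine ⟨by rw [hgo]; exact h1, ?_⟩
        intro j hj
        rcases Nat.lt_or_ge j (k + 1) with hlt | hge
        · exact h2 j (by omega)
        · have : j = k + 1 := by omega
          simpa [this] using h
      · right
        refine ⟨j, by omega, by rw [hgo]; exact hval, hpre, ?_⟩
        intro j' hj1 hj2
        rcases Nat.lt_or_ge j' (k + 1) with hlt | hge
        · exact hmax j' hj1 (by omega)
        · have : j' = k + 1 := by omega
          simpa [this] using h

-- a suffix starting with '.' whose tail is dot-free: endswith is drop-at-rfind equality
lemma endswith_iff_drop (l : List Char) (j : Nat) (t : List Char)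
    (hd : l.drop j = '.' :: t) (ht : '.' ∉ t) (u : List Char) (hu : '.' ∉ u) :
    PySem.Chars.endswith l ('.' :: u) = true ↔ l.drop j = '.' :: u := by
  constructor
  · intro h
    rcases (PySem.Chars.endswith_iff l ('.' :: u)).mp h with ⟨p, hp⟩
    have hm : l.drop p.length = '.' :: u := by
      rw [← hp, List.drop_append]; simp
    rcases Nat.lt_trichotomy p.length j with hlt | heq | hgt
    · -- the '.' heading u's copy would sit strictly before j: then t contains '.'
      exfalso
      have hdj : l.drop j = ('.' :: u).drop (j - p.length) := by
        conv_lhs => rw [← hp]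
        rw [List.drop_append]
        have : j - p.length ≠ 0 := by omega
        simp [List.drop_eq_nil_of_le (by omega : p.length ≤ j)]
      have hpos : j - p.length ≠ 0 := by omega
      rcases Nat.exists_eq_succ_of_ne_zero hpos with ⟨d, hdd⟩
      rw [hdd] at hdj
      simp only [List.drop_succ_cons] at hdj
      have : '.' ∈ u.drop d := by rw [← hdj, hd]; exact List.mem_cons_self
      exact hu (List.mem_of_mem_drop this)
    · rw [heq] at hm; exact hm
    · -- the '.' heading this suffix would be inside t
      exfalso
      have hdj : l.drop p.length = (l.drop j).drop (p.length - j) := by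
        rw [List.drop_drop]; congr 1; omega
      rw [hd] at hdj
      have hpos : p.length - j ≠ 0 := by omega
      rcases Nat.exists_eq_succ_of_ne_zero hpos with ⟨d, hdd⟩
      rw [hdd] at hdj
      simp only [List.drop_succ_cons] at hdj
      have : '.' ∈ t.drop d := by rw [← hdj, hm]; exact List.mem_cons_self
      exact ht (List.mem_of_mem_drop this)
  · intro h
    exact (PySem.Chars.endswith_iff l ('.' :: u)).mpr (h ▸ List.drop_suffix j l)

lemma chars_endswith_no_dot (l E : List Char) (h : '.' ∉ l) (hdot : '.' ∈ E) :
    PySem.Chars.endswith l E = false := by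
  rw [Bool.eq_false_iff]
  intro hc
  exact h (((PySem.Chars.endswith_iff _ _).mp hc).subset hdot)

theorem satisfy_modal_eq (info : String) : satisfy_modal info = satisfy_modal_alt info := by
  unfold satisfy_modal satisfy_modal_alt
  simp only [PySem.Str.rfind_eq, PySem.Chars.rfind]
  have hlist : (".").toList = ['.'] := rfl
  rw [hlist]
  rcases rfind_go_spec info.toList info.toList.length with ⟨hval, hnone⟩ | ⟨j, hjk, hval, hpre, hmax⟩
  · -- no dot in info: A's loops all fail, B returns None at i == -1
    have hno : '.' ∉ info.toList := by
      intro hm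
      rcases List.getElem_of_mem hm with ⟨i, hi, hget⟩
      refine hnone i (by omega) ?_
      rw [List.drop_eq_getElem_cons hi, hget]
      exact ⟨_, rfl⟩
    rw [hval]
    have hA : AUDIO_FILES.any (fun file => PySem.Str.endswith info file) = false := by
      rw [List.any_eq_false]; intro f hf
      fin_cases hf <;> simp [PySem.Str.endswith_eq, chars_endswith_no_dot info.toList _ hno]
    have hI : IMAGE_FILES.any (fun file => PySem.Str.endswith info file) = false := by
      rw [List.any_eq_false]; intro f hf
      fin_cases hf <;> simp [PySem.Str.endswith_eq, chars_endswith_no_dot info.toList _ hno]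
    have hV : VIDEO_FILES.any (fun file => PySem.Str.endswith info file) = false := by
      rw [List.any_eq_false]; intro f hf
      fin_cases hf <;> simp [PySem.Str.endswith_eq, chars_endswith_no_dot info.toList _ hno]
    simp only [hA, hI, hV]
    simp
  · -- a last dot at index j: both sides depend only on info.toList.drop j
    rcases hpre with ⟨t, ht'⟩
    have hd : info.toList.drop j = '.' :: t := ht'.symm
    have ht : '.' ∉ t := by
      intro hm
      rcases List.getElem_of_mem hm with ⟨d, hdlt, hget⟩
      have hlen : (info.toList.drop j).length = info.toList.length - j := List.length_drop ..
      rw [hd] at hlen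
      simp only [List.length_cons] at hlen
      refine hmax (j + 1 + d) (by omega) (by omega) ?_
      have h1 : info.toList.drop (j + 1) = t := by
        have h0 : List.drop 1 (List.drop j info.toList) = List.drop (j + 1) info.toList :=
          List.drop_drop ..
        rw [hd] at h0
        simpa using h0.symm
      have h2 : info.toList.drop (j + 1 + d) = t.drop d := by
        rw [← h1, List.drop_drop]
      rw [h2, List.drop_eq_getElem_cons hdlt, hget]
      exact ⟨_, rfl⟩
    have hchar := endswith_iff_drop info.toList j t hd ht
    have hE : ∀ (E : String) (u : List Char), E.toList = '.' :: u → '.' ∉ u →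
        PySem.Str.endswith info E = decide (t = u) := by
      intro E u hEu hu
      rw [PySem.Str.endswith_eq, hEu]
      by_cases hcase : t = u
      · simp only [hcase, decide_true]
        exact (hchar u hu).mpr (by rw [hd, hcase])
      · simp only [hcase, decide_false, Bool.eq_false_iff]
        intro hc
        have h0 := (hchar u hu).mp hc
        rw [hd] at h0
        simp only [List.cons.injEq] at h0
        exact hcase h0.2
    have hK : (PySem.Str.slice info (some ((j : Nat) : Int)) none).toList = '.' :: t := by
      rw [PySem.Str.toList_slice]
      show PySem.List.slice info.toList (some ((j : Nat) : Int)) none = '.' :: t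
      rw [PySem.List.slice_from_natCast]
      exact hd
    have hbeq : ∀ (E : String) (u : List Char), E.toList = '.' :: u →
        (E == PySem.Str.slice info (some ((j : Nat) : Int)) none) = decide (t = u) := by
      intro E u hEu
      by_cases hcase : t = u
      · simp only [hcase, decide_true, beq_iff_eq]
        apply String.toList_inj.mp
        rw [hEu, hK, hcase]
      · simp only [hcase, decide_false]
        rw [beq_eq_false_iff_ne]
        intro he
        rw [he] at hEu
        rw [hK] at hEu
        simp only [List.cons.injEq] at hEu
        exact hcase hEu.2
    rw [hval]
    have hne : ¬ ((j : Nat) : Int) = -1 := by omega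
    have hEXT : EXT_TO_MODAL = PySem.Dict.mk
      [(".wav", "audio"), (".mp3", "audio"), (".flac", "audio"), (".m4a", "audio"),
       (".ogg", "audio"), (".aac", "audio"),
       (".jpg", "image"), (".jpeg", "image"), (".png", "image"), (".bmp", "image"),
       (".gif", "image"), (".tiff", "image"), (".ico", "image"), (".webp", "image"),
       (".mp4", "video"), (".avi", "video"), (".mov", "video"), (".mkv", "video"),
       (".wmv", "video"), (".flv", "video"), (".webm", "video")] := by rfl
    simp only [AUDIO_FILES, IMAGE_FILES, VIDEO_FILES, List.any_cons, List.any_nil,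
      Bool.or_false, hEXT, PySem.Dict.get?_mk_cons,
      if_neg hne,
      hE ".wav" ['w', 'a', 'v'] rfl (by decide),
      hE ".mp3" ['m', 'p', '3'] rfl (by decide),
      hE ".flac" ['f', 'l', 'a', 'c'] rfl (by decide),
      hE ".m4a" ['m', '4', 'a'] rfl (by decide),
      hE ".ogg" ['o', 'g', 'g'] rfl (by decide),
      hE ".aac" ['a', 'a', 'c'] rfl (by decide),
      hE ".jpg" ['j', 'p', 'g'] rfl (by decide),
      hE ".jpeg" ['j', 'p', 'e', 'g'] rfl (by decide),
      hE ".png" ['p', 'n', 'g'] rfl (by decide),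
      hE ".bmp" ['b', 'm', 'p'] rfl (by decide),
      hE ".gif" ['g', 'i', 'f'] rfl (by decide),
      hE ".tiff" ['t', 'i', 'f', 'f'] rfl (by decide),
      hE ".ico" ['i', 'c', 'o'] rfl (by decide),
      hE ".webp" ['w', 'e', 'b', 'p'] rfl (by decide),
      hE ".mp4" ['m', 'p', '4'] rfl (by decide),
      hE ".avi" ['a', 'v', 'i'] rfl (by decide),
      hE ".mov" ['m', 'o', 'v'] rfl (by decide),
      hE ".mkv" ['m', 'k', 'v'] rfl (by decide),
      hE ".wmv" ['w', 'm', 'v'] rfl (by decide),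
      hE ".flv" ['f', 'l', 'v'] rfl (by decide),
      hE ".webm" ['w', 'e', 'b', 'm'] rfl (by decide),
      hbeq ".wav" ['w', 'a', 'v'] rfl,
      hbeq ".mp3" ['m', 'p', '3'] rfl,
      hbeq ".flac" ['f', 'l', 'a', 'c'] rfl,
      hbeq ".m4a" ['m', '4', 'a'] rfl,
      hbeq ".ogg" ['o', 'g', 'g'] rfl,
      hbeq ".aac" ['a', 'a', 'c'] rfl,
      hbeq ".jpg" ['j', 'p', 'g'] rfl,
      hbeq ".jpeg" ['j', 'p', 'e', 'g'] rfl,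
      hbeq ".png" ['p', 'n', 'g'] rfl,
      hbeq ".bmp" ['b', 'm', 'p'] rfl,
      hbeq ".gif" ['g', 'i', 'f'] rfl,
      hbeq ".tiff" ['t', 'i', 'f', 'f'] rfl,
      hbeq ".ico" ['i', 'c', 'o'] rfl,
      hbeq ".webp" ['w', 'e', 'b', 'p'] rfl,
      hbeq ".mp4" ['m', 'p', '4'] rfl,
      hbeq ".avi" ['a', 'v', 'i'] rfl,
      hbeq ".mov" ['m', 'o', 'v'] rfl,
      hbeq ".mkv" ['m', 'k', 'v'] rfl,
      hbeq ".wmv" ['w', 'm', 'v'] rfl,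
      hbeq ".flv" ['f', 'l', 'v'] rfl,
      hbeq ".webm" ['w', 'e', 'b', 'm'] rfl]
    by_cases h0 : t = ['w', 'a', 'v'] <;> simp [h0]
    by_cases h1 : t = ['m', 'p', '3'] <;> simp [h1]
    by_cases h2 : t = ['f', 'l', 'a', 'c'] <;> simp [h2]
    by_cases h3 : t = ['m', '4', 'a'] <;> simp [h3]
    by_cases h4 : t = ['o', 'g', 'g'] <;> simp [h4]
    by_cases h5 : t = ['a', 'a', 'c'] <;> simp [h5]
    by_cases h6 : t = ['j', 'p', 'g'] <;> simp [h6]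
    by_cases h7 : t = ['j', 'p', 'e', 'g'] <;> simp [h7]
    by_cases h8 : t = ['p', 'n', 'g'] <;> simp [h8]
    by_cases h9 : t = ['b', 'm', 'p'] <;> simp [h9]
    by_cases h10 : t = ['g', 'i', 'f'] <;> simp [h10]
    by_cases h11 : t = ['t', 'i', 'f', 'f'] <;> simp [h11]
    by_cases h12 : t = ['i', 'c', 'o'] <;> simp [h12]
    by_cases h13 : t = ['w', 'e', 'b', 'p'] <;> simp [h13]
    by_cases h14 : t = ['m', 'p', '4'] <;> simp [h14]
    by_cases h15 : t = ['a', 'v', 'i'] <;> simp [h15]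
    by_cases h16 : t = ['m', 'o', 'v'] <;> simp [h16]
    by_cases h17 : t = ['m', 'k', 'v'] <;> simp [h17]
    by_cases h18 : t = ['w', 'm', 'v'] <;> simp [h18]
    by_cases h19 : t = ['f', 'l', 'v'] <;> simp [h19]
    by_cases h20 : t = ['w', 'e', 'b', 'm'] <;> simp [h20]
    simp [PySem.Dict.get?]

-- ===== VERDICT (by name: the statement is the Claim_ definition above) =====
theorem satisfy_modal_spec : Claim_equal_satisfy_modal := by
  intro info _
  unfold Spec_satisfy_modal
  exact satisfy_modal_eq info
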